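-- pv_equiv track=rewrite | github.com/LSBB123/MPMLearning | MPMLearning 1.0.py | process_rep_allocation
-- ===== SOURCE A (Python) =====
-- def process_rep_allocation(n_renum, n_jobs):
--
--     process_re_num = n_renum // n_jobs
--     renum_legacy = n_renum % n_jobs
--     first_re = 0
--     process_num = []
--
--     process_re_nums = [process_re_num for i in range(n_jobs)]
--     for i in range(renum_legacy):
--         process_re_nums[i] += 1
--     for i in range(len(process_re_nums)):
--         process_num.append((first_re, first_re + process_re_nums[i]))
--         first_re = first_re + process_re_nums[i]
--
--     return process_num
-- ===== SOURCE B (Python) =====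
-- def process_rep_allocation(n_renum, n_jobs):
--     # Closed-form boundaries: job i covers [i*q + min(i, r), (i+1)*q + min(i+1, r)).
--     q, r = divmod(n_renum, n_jobs)
--     return [(i * q + min(i, r), (i + 1) * q + min(i + 1, r)) for i in range(n_jobs)]
-- ===== Notes on version B (the rewrite author's own statement) =====
-- stated objective: simpler
-- what changed: Replaces the intermediate per-job size list and the running-sum accumulator with a single comprehension computing each range boundary by the closed form i*q + min(i, r).
import Mathlib
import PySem

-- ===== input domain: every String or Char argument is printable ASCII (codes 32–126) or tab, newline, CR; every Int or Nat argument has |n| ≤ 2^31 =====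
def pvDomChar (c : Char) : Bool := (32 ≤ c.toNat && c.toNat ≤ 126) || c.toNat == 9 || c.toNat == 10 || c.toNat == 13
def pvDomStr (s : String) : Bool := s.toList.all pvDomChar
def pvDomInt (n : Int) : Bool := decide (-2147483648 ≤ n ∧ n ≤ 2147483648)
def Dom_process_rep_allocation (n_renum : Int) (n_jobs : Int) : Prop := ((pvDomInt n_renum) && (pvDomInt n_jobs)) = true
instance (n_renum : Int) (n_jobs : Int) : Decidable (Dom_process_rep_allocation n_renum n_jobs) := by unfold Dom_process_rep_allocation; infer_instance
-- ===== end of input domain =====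

-- ===== PORT A =====
-- B changes only the decomposition: closed-form range boundaries instead of a size list + running sum (objective: simpler).
-- Both loop indices in A are in range by construction (0 ≤ i < len), so .set/.pyGetD are exact here.
def process_rep_allocation (n_renum : Int) (n_jobs : Int) : List (Int × Int) :=
  let process_re_num := PySem.Int.floordiv n_renum n_jobs
  let renum_legacy := PySem.Int.mod n_renum n_jobs
  let process_re_nums0 := (PySem.List.pyRange 0 n_jobs 1).map (fun _ => process_re_num)
  let process_re_nums := (PySem.List.pyRange 0 renum_legacy 1).foldl
      (fun l i => l.set i.toNat (l.getD i.toNat 0 + 1)) process_re_nums0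
  let res := (PySem.List.pyRange 0 (process_re_nums.length : Int) 1).foldl
      (fun (acc : List (Int × Int) × Int) i =>
        let s := PySem.List.pyGetD process_re_nums i 0
        (acc.1 ++ [(acc.2, acc.2 + s)], acc.2 + s)) ([], 0)
  res.1

-- ===== PORT B =====
def process_rep_allocation_alt (n_renum : Int) (n_jobs : Int) : List (Int × Int) :=
  let q := PySem.Int.floordiv n_renum n_jobs
  let r := PySem.Int.mod n_renum n_jobs
  (PySem.List.pyRange 0 n_jobs 1).map (fun i => (i * q + min i r, (i + 1) * q + min (i + 1) r))

-- ===== PRECONDITION & SPEC =====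
-- Python raises ZeroDivisionError iff n_jobs == 0 (both A and B divide by n_jobs).
def Pre_process_rep_allocation (n_renum : Int) (n_jobs : Int) : Prop := n_jobs ≠ 0
instance (n_renum : Int) (n_jobs : Int) : Decidable (Pre_process_rep_allocation n_renum n_jobs) := by unfold Pre_process_rep_allocation; infer_instance
def pvWitness_process_rep_allocation : Int × Int := (7, 3)

def Spec_process_rep_allocation (n_renum : Int) (n_jobs : Int) (out : List (Int × Int)) : Prop := out = process_rep_allocation_alt n_renum n_jobs
instance (n_renum : Int) (n_jobs : Int) (out : List (Int × Int)) : Decidable (Spec_process_rep_allocation n_renum n_jobs out) := by unfold Spec_process_rep_allocation; infer_instance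

-- ===== CLAIM (what is proved, stated in full; the proofs are below) =====
def Claim_equal_process_rep_allocation : Prop := ∀ (n_renum : Int) (n_jobs : Int), Dom_process_rep_allocation n_renum n_jobs → Pre_process_rep_allocation n_renum n_jobs → Spec_process_rep_allocation n_renum n_jobs (process_rep_allocation n_renum n_jobs)

-- ===== LEMMAS AND PROOFS =====

lemma fmod_nonpos_of_neg (a b : Int) (h : b < 0) : a.fmod b ≤ 0 := by
  have h1 : a % b = a % (-b) := by rw [Int.emod_neg]
  have h2 : 0 ≤ a % (-b) := Int.emod_nonneg a (by omega)
  have h3 : a % (-b) < -b := Int.emod_lt_of_pos a (by omega)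
  rw [Int.fmod_eq_emod]
  split_ifs with hc
  · rcases hc with hb | hd
    · omega
    · have := Int.emod_eq_zero_of_dvd hd; omega
  · omega

-- the size-list after the increment loop, for positive n_jobs
lemma sizes_eq (q : Int) (n rn : Nat) (hr : rn ≤ n) :
    (PySem.List.pyRange 0 (rn : Int) 1).foldl
      (fun l i => l.set i.toNat (l.getD i.toNat 0 + 1))
      ((List.range n).map (fun _ => q))
    = (List.range n).map (fun k => if k < rn then q + 1 else q) := by
  induction rn with
  | zero =>
    simp [PySem.List.pyRange_one_eq_nil (le_refl (0:Int))]
  | succ m ih =>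
    have hm : m ≤ n := Nat.le_of_succ_le hr
    have hcast : ((m + 1 : Nat) : Int) = (m : Int) + 1 := by push_cast; ring
    rw [hcast, PySem.List.pyRange_one_succ_right (by positivity), List.foldl_append, ih hm]
    simp only [List.foldl_cons, List.foldl_nil, Int.toNat_natCast]
    apply List.ext_getElem
    · simp
    · intro k hk1 hk2
      simp only [List.length_set, List.length_map, List.length_range] at hk1
      rw [List.getElem_set]
      have hmn : m < n := hr
      by_cases hkm : m = k
      · subst hkm
        simp [List.getD, hmn]
      · simp only [if_neg hkm]
        simp only [List.getElem_map, List.getElem_range]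
        by_cases hkm2 : k < m
        · simp [hkm2, Nat.lt_succ_of_lt hkm2]
        · have : ¬ k < m + 1 := by omega
          simp [hkm2, this]

-- the output fold, for the closed-form size list
lemma out_fold_eq (q r : Int) (n : Nat) (hr0 : 0 ≤ r) (hrn : r ≤ (n : Int))
    (sizes : List Int)
    (hs : sizes = (List.range n).map (fun k => if k < r.toNat then q + 1 else q)) :
    ∀ m : Nat, m ≤ n →
    (PySem.List.pyRange 0 (m : Int) 1).foldl
      (fun (acc : List (Int × Int) × Int) i =>
        let s := PySem.List.pyGetD sizes i 0
        (acc.1 ++ [(acc.2, acc.2 + s)], acc.2 + s)) ([], 0)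
    = ((PySem.List.pyRange 0 (m : Int) 1).map
         (fun i => (i * q + min i r, (i + 1) * q + min (i + 1) r)),
       (m : Int) * q + min (m : Int) r) := by
  intro m hm
  induction m with
  | zero =>
    simp [PySem.List.pyRange_one_eq_nil (le_refl (0:Int))]
    omega
  | succ mm ih =>
    have hmm : mm ≤ n := Nat.le_of_succ_le hm
    have hcast : ((mm + 1 : Nat) : Int) = (mm : Int) + 1 := by push_cast; ring
    rw [hcast, PySem.List.pyRange_one_succ_right (by positivity), List.foldl_append,
      List.map_append, ih hmm]
    simp only [List.foldl_cons, List.foldl_nil, List.map_cons, List.map_nil]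
    have hget : PySem.List.pyGetD sizes (mm : Int) 0 = if mm < r.toNat then q + 1 else q := by
      rw [hs, PySem.List.pyGetD_natCast, PySem.List.getD_map_range _ _ _ _ (by omega)]
    rw [hget]
    have hq : ((mm : Int) + 1) * q = (mm : Int) * q + q := by ring
    have hmin : min ((mm : Int)) r + (if mm < r.toNat then (1:Int) else 0)
        = min ((mm : Int) + 1) r := by
      split_ifs with h <;> omega
    have key : ((mm : Int) * q + min (mm : Int) r) + (if mm < r.toNat then q + 1 else q)
        = ((mm : Int) + 1) * q + min ((mm : Int) + 1) r := by
      split_ifs at hmin ⊢ with h <;> linarith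
    rw [key]

lemma pos_case (n_renum : Int) (n : Nat) (hn : 0 < n) :
    process_rep_allocation n_renum (n : Int) = process_rep_allocation_alt n_renum (n : Int) := by
  unfold process_rep_allocation process_rep_allocation_alt
  dsimp only
  have hpos : (0:Int) < (n:Int) := by exact_mod_cast hn
  have hr0 : 0 ≤ PySem.Int.mod n_renum (n:Int) := by
    rw [PySem.Int.mod_eq_emod_of_pos hpos]; exact Int.emod_nonneg _ (by omega)
  have hrn : PySem.Int.mod n_renum (n:Int) < (n:Int) := by
    rw [PySem.Int.mod_eq_emod_of_pos hpos]; exact Int.emod_lt_of_pos _ hpos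
  have hrtn : ((PySem.Int.mod n_renum (n:Int)).toNat : Int) = PySem.Int.mod n_renum (n:Int) :=
    Int.toNat_of_nonneg hr0
  have h0 : (PySem.List.pyRange 0 (n:Int) 1).map (fun _ => PySem.Int.floordiv n_renum (n:Int))
      = (List.range n).map (fun _ => PySem.Int.floordiv n_renum (n:Int)) := by
    rw [PySem.List.pyRange_zero_natCast, List.map_map]; rfl
  rw [h0]
  have hsz := sizes_eq (PySem.Int.floordiv n_renum (n:Int)) n
    (PySem.Int.mod n_renum (n:Int)).toNat (by omega)
  rw [hrtn] at hsz
  rw [hsz]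
  have hlen : (((List.range n).map (fun k =>
      if k < (PySem.Int.mod n_renum (n:Int)).toNat then PySem.Int.floordiv n_renum (n:Int) + 1
      else PySem.Int.floordiv n_renum (n:Int))).length : Int) = (n:Int) := by simp
  rw [hlen]
  have hout := out_fold_eq (PySem.Int.floordiv n_renum (n:Int)) (PySem.Int.mod n_renum (n:Int)) n
    hr0 (by omega) _ rfl n (le_refl n)
  rw [hout]

theorem process_rep_allocation_spec : Claim_equal_process_rep_allocation := by
  intro n_renum n_jobs _ hpre
  unfold Pre_process_rep_allocation at hpre
  unfold Spec_process_rep_allocation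
  by_cases hpos : 0 < n_jobs
  · obtain ⟨n, hn⟩ : ∃ n : Nat, n_jobs = (n : Int) := ⟨n_jobs.toNat, by omega⟩
    subst hn
    exact pos_case n_renum n (by omega)
  · have hneg : n_jobs < 0 := by omega
    unfold process_rep_allocation process_rep_allocation_alt
    dsimp only
    have hrle : PySem.Int.mod n_renum n_jobs ≤ 0 := by
      show n_renum.fmod n_jobs ≤ 0
      exact fmod_nonpos_of_neg _ _ hneg
    rw [PySem.List.pyRange_one_eq_nil (le_of_lt hneg),
      PySem.List.pyRange_one_eq_nil hrle]
    simp [PySem.List.pyRange_one_eq_nil (le_refl (0:Int))]
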